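-- pv_equiv track=rewrite | github.com/karimkmafifi/Genome-Sequencing-Bioinformatics-II---Coursera | Week 2/ContigGeneration.py | pathToGenome
-- ===== SOURCE A (Python) =====
-- def pathToGenome(contigs):
--     finalContigs = []
--     for contig in contigs:
--         finalContig = ''
--         for i in range(len(contig)):
--             if i < len(contig)-1:
--                 finalContig += contig[i][0]
--             else:
--                 finalContig += contig[i]
--         finalContigs.append(finalContig)
--     return ' '.join(finalContigs)
-- ===== SOURCE B (Python) =====
-- def pathToGenome(contigs):
--     def build(contig):
--         if not contig:
--             return ''
--         if len(contig) == 1: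
--             return contig[0]
--         return contig[0][0] + build(contig[1:])
--
--     def glue(cs):
--         if not cs:
--             return ''
--         if len(cs) == 1:
--             return build(cs[0])
--         return build(cs[0]) + ' ' + glue(cs[1:])
--
--     return glue(contigs)
-- ===== Notes on version B (the rewrite author's own statement) =====
-- stated objective: alternative
-- what changed: Replaces A's iterative accumulator loops (an index-based inner loop branching on the last position, plus an outer append-and-join loop) by a pair of structural recursions: build(contig) recurses on the k-mer list taking the head character until the singleton base case returns the last k-mer whole, and glue recurses over the contigs inserting separators, so there is no index arithmetic, no accumulator and no join.
-- outside the precondition, e.g. on pathToGenome([['', 'AB']]): A raises IndexError, B raises IndexError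
import Mathlib
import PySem

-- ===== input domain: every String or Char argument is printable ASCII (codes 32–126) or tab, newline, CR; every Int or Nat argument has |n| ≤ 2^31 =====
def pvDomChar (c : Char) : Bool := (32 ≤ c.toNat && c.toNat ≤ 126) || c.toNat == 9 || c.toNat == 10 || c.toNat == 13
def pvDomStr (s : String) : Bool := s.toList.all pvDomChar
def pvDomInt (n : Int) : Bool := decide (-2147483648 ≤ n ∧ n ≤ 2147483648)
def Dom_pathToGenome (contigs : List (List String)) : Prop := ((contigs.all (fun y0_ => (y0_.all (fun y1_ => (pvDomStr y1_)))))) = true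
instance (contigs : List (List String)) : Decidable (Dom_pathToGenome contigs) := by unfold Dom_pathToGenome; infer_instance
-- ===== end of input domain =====

-- B replaces A's index-based accumulator loops by structural recursion: build(contig) recurses
-- taking head characters until the final k-mer, glue recurses over contigs inserting ' ': alternative decomposition.


-- s[0] as a one-character string; Python raises IndexError on "" (excluded by Pre_), where this returns "".
def pyHead (s : String) : String :=
  match PySem.Str.pyGet? s 0 with
  | some c => String.ofList [c]
  | none => ""

-- ===== PORT A =====
def pathToGenome (contigs : List (List String)) : String :=
  let finalContigs := contigs.foldl (fun fcs contig =>
    let finalContig := (PySem.List.pyRange 0 (PySem.List.len contig)).foldl (fun fc i =>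
      if i < PySem.List.len contig - 1 then
        fc ++ pyHead (PySem.List.pyGetD contig i "")
      else
        fc ++ PySem.List.pyGetD contig i "") ""
    fcs ++ [finalContig]) []
  PySem.Str.join " " finalContigs

-- ===== PORT B =====
-- build: recursion on the k-mer list (head char + recurse; singleton returns the k-mer whole)
def buildContig : List String → String
  | [] => ""
  | [last] => last
  | s :: t :: rest => pyHead s ++ buildContig (t :: rest)

-- glue: recursion over the contigs, inserting ' ' between consecutive results
def glueContigs : List (List String) → String
  | [] => ""
  | [c] => buildContig c
  | c :: d :: rest => buildContig c ++ " " ++ glueContigs (d :: rest)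

def pathToGenome_alt (contigs : List (List String)) : String :=
  glueContigs contigs

-- ===== PRECONDITION & SPEC =====
-- Pre_ excludes exactly the inputs where some contig has an empty k-mer before its last
-- position: there 'contig[i][0]' raises IndexError in A (and B raises the same way).
def Pre_pathToGenome (contigs : List (List String)) : Prop :=
  (contigs.all (fun contig => contig.dropLast.all (fun s => s ≠ ""))) = true
instance (contigs : List (List String)) : Decidable (Pre_pathToGenome contigs) := by
  unfold Pre_pathToGenome; infer_instance
def pvWitness_pathToGenome : List (List String) := [["AB", "BC", "CD"], ["XY", "YZ"]]

def Spec_pathToGenome (contigs : List (List String)) (out : String) : Prop := out = pathToGenome_alt contigs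
instance (contigs : List (List String)) (out : String) : Decidable (Spec_pathToGenome contigs out) := by unfold Spec_pathToGenome; infer_instance

-- ===== CLAIM (what is proved, stated in full; the proofs are below) =====
def Claim_equal_pathToGenome : Prop := ∀ (contigs : List (List String)), Dom_pathToGenome contigs → Pre_pathToGenome contigs → Spec_pathToGenome contigs (pathToGenome contigs)

-- ===== LEMMAS AND PROOFS =====

theorem chars_join_empty (ls : List (List Char)) :
    PySem.Chars.join [] ls = ls.flatten := by
  induction ls with
  | nil => simp [PySem.Chars.join_nil]
  | cons p rest ih =>
    cases rest with
    | nil => simp [PySem.Chars.join_singleton]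
    | cons q rs =>
      rw [PySem.Chars.join_cons_cons]
      simp_all

theorem str_join_empty_cons (x : String) (l : List String) :
    PySem.Str.join "" (x :: l) = x ++ PySem.Str.join "" l := by
  apply String.toList_injective
  simp [PySem.Str.toList_join, chars_join_empty]

theorem foldl_pyHead (xs : List String) (acc : String) :
    xs.foldl (fun fc s => fc ++ pyHead s) acc = acc ++ PySem.Str.join "" (xs.map pyHead) := by
  induction xs generalizing acc with
  | nil =>
    apply String.toList_injective
    simp [PySem.Str.toList_join]
  | cons x xs ih =>
    simp only [List.foldl_cons, List.map_cons, str_join_empty_cons, ih]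
    rw [String.append_assoc]

theorem build_concat (xs : List String) (x : String) :
    buildContig (xs ++ [x]) = PySem.Str.join "" (xs.map pyHead) ++ x := by
  induction xs with
  | nil =>
    apply String.toList_injective
    simp [buildContig, PySem.Str.toList_join, chars_join_empty]
  | cons s xs ih =>
    cases xs with
    | nil =>
      apply String.toList_injective
      simp [buildContig, PySem.Str.toList_join, chars_join_empty]
    | cons t ts =>
      show pyHead s ++ buildContig ((t :: ts) ++ [x]) = _
      rw [ih]
      simp only [List.map_cons, str_join_empty_cons, String.append_assoc]

theorem inner_eq (contig : List String) :
    (PySem.List.pyRange 0 (PySem.List.len contig)).foldl (fun fc i =>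
      if i < PySem.List.len contig - 1 then
        fc ++ pyHead (PySem.List.pyGetD contig i "")
      else
        fc ++ PySem.List.pyGetD contig i "") ""
    = buildContig contig := by
  rcases List.eq_nil_or_concat contig with h | ⟨xs, x, h⟩
  · subst h
    apply String.toList_injective
    simp [PySem.List.pyRange, PySem.List.len, buildContig]
  · subst h
    simp only [List.concat_eq_append]
    rw [build_concat]
    have hlen : PySem.List.len (xs ++ [x]) = (xs.length : Int) + 1 := by
      simp [PySem.List.len_eq]
    rw [hlen]
    rw [PySem.List.pyRange_one_append 0 (xs.length : Int) ((xs.length : Int) + 1)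
      (by positivity) (by omega)]
    rw [List.foldl_append]
    -- the prefix part: every i in range has i < len - 1 and indexes into xs
    have hpref : ∀ (acc : String), ∀ i ∈ PySem.List.pyRange 0 (xs.length : Int),
        (if i < (xs.length : Int) + 1 - 1 then
          acc ++ pyHead (PySem.List.pyGetD (xs ++ [x]) i "")
        else acc ++ PySem.List.pyGetD (xs ++ [x]) i "")
        = acc ++ pyHead (PySem.List.pyGetD xs i "") := by
      intro acc i hi
      rw [PySem.List.mem_pyRange_one] at hi
      rw [if_pos (by omega)]
      congr 2
      rw [PySem.List.pyGetD_eq_getElem (xs ++ [x]) "" hi.1 (by simp; omega),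
          PySem.List.pyGetD_eq_getElem xs "" hi.1 (by exact_mod_cast hi.2)]
      rw [List.getElem_append_left]
    rw [PySem.List.foldl_congr_mem _ _ _ _ hpref]
    have := PySem.List.foldl_pyRange_pyGetD xs "" (fun fc s => fc ++ pyHead s) "" (a := 0) le_rfl
    simp only [PySem.List.len_eq] at this ⊢
    rw [this]
    simp only [Int.toNat_zero, List.drop_zero]
    rw [foldl_pyHead]
    -- the last step: i = xs.length, condition false, takes the whole string x
    have hone : PySem.List.pyRange (xs.length : Int) ((xs.length : Int) + 1) = [(xs.length : Int)] := by
      rw [PySem.List.pyRange_one_cons (by omega), PySem.List.pyRange_one_eq_nil (by omega)]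
    rw [hone]
    simp only [List.foldl_cons, List.foldl_nil, if_neg (by omega : ¬ ((xs.length : Int) < (xs.length : Int) + 1 - 1))]
    have hx : PySem.List.pyGetD (xs ++ [x]) (xs.length : Int) "" = x := by
      rw [PySem.List.pyGetD_eq_getElem (xs ++ [x]) "" (by positivity) (by simp)]
      simp
    rw [hx]
    apply String.toList_injective
    simp

theorem glue_eq (l : List (List String)) :
    PySem.Str.join " " (l.map buildContig) = glueContigs l := by
  induction l with
  | nil =>
    apply String.toList_injective
    simp [glueContigs, PySem.Str.toList_join, PySem.Chars.join_nil]
  | cons c rest ih =>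
    cases rest with
    | nil =>
      apply String.toList_injective
      simp [glueContigs, PySem.Str.toList_join, PySem.Chars.join_singleton]
    | cons d rs =>
      show PySem.Str.join " " (buildContig c :: buildContig d :: rs.map buildContig) = _
      apply String.toList_injective
      have h1 := ih
      apply_fun String.toList at h1
      simp only [PySem.Str.toList_join, List.map_cons] at h1 ⊢
      rw [PySem.Chars.join_cons_cons]
      simp only [glueContigs, String.toList_append]
      simp_all [List.map_map]

-- ===== VERDICT (by name: the statement is the Claim_ definition above) =====
theorem pathToGenome_spec : Claim_equal_pathToGenome := by
  intro contigs _ _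
  unfold Spec_pathToGenome pathToGenome pathToGenome_alt
  simp only [PySem.List.foldl_append_singleton_eq_map, List.nil_append]
  rw [← glue_eq]
  congr 1
  apply List.map_congr_left
  intro contig _
  exact inner_eq contig
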